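-- pv_equiv track=rewrite | github.com/AP-MI-2021/lab-3-MihneaNeagu | main.py | get_longest_all_palindromes
-- ===== SOURCE A (Python) =====
-- def check_if_palindrome(n):
--     '''
--     Functia verifica daca un numar este palindrom
--     param: n-numarul de verificat
--     return: True daca nr este palindrom, False daca nu
--     '''
--     aux=n
--     inv=0
--     while aux:
--         inv=inv*10+int(aux%10)
--         aux=int(aux/10)
--     if n==inv:
--         return True
--     else:
--         return False
--
-- def get_longest_all_palindromes(list):
--     '''
--     Functia calculeaza subsecventa cea mai lunga de numere palindrom
--     param: list-lista de numere
--     return: rezultat-cea mai lunga subsecventa cu conditia data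
--     '''
--     largest = 0
--     temp_largest = 0
--     location = 0
--     for count, value in enumerate(list):
--         if check_if_palindrome(value)==True:
--             temp_largest += 1
--         else:
--             temp_largest = 0
--         if temp_largest >= largest:
--             largest = temp_largest
--             location = count + 1 - temp_largest
--     rezultat = []
--     for i in range(location,location+largest):
--         rezultat.append(list[i])
--
--     return rezultat
-- ===== SOURCE B (Python) =====
-- def check_if_palindrome(n):
--     '''
--     Functia verifica daca un numar este palindrom
--     param: n-numarul de verificat
--     return: True daca nr este palindrom, False daca nu
--     '''
--     aux=n
--     inv=0
--     while aux:
--         inv=inv*10+int(aux%10)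
--         aux=int(aux/10)
--     if n==inv:
--         return True
--     else:
--         return False
--
-- def get_longest_all_palindromes(list):
--     '''
--     Scan once keeping the current run of palindromes as a list and the best run so far;
--     '>=' makes equal-length runs resolve to the last one, and the winning run is returned
--     directly with no index/slice reconstruction.
--     '''
--     best = []
--     cur = []
--     for value in list:
--         if check_if_palindrome(value):
--             cur = cur + [value]
--         else:
--             cur = []
--         if len(cur) >= len(best):
--             best = cur
--     return best
-- ===== Notes on version B (the rewrite author's own statement) =====
-- stated objective: simpler
-- what changed: Replaces A's counter/index tracking plus a separate index-reconstruction loop with a single scan that accumulates the current palindrome run as a list and keeps the best run so far, returning it directly.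
import Mathlib
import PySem

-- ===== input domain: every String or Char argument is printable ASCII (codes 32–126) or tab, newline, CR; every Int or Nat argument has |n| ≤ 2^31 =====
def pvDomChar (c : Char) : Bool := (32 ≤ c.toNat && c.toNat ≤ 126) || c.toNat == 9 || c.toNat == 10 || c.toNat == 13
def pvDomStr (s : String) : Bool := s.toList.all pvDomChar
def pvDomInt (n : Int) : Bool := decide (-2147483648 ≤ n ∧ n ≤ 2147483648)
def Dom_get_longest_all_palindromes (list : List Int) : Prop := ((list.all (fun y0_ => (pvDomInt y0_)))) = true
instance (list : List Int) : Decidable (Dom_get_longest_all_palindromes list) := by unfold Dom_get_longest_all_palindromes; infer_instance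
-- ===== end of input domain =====

-- B replaces A's counter/index bookkeeping plus a separate index-reconstruction loop by one scan
-- that keeps the current palindrome run and the best run as lists and returns the best run directly
-- (objective: simpler).

-- ===== PORT A =====
-- termination measure for the while-loop below (cited by its decreasing_by)
lemma pv_tdiv_ten_natAbs_lt (a : Int) (h : a ≠ 0) : (PySem.Int.truncdiv a 10).natAbs < a.natAbs := by
  simp only [PySem.Int.truncdiv]
  rw [Int.natAbs_tdiv]
  exact Nat.div_lt_self (Int.natAbs_pos.mpr h) (by norm_num)

-- while aux: inv = inv*10 + int(aux%10); aux = int(aux/10)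
-- int(aux/10) is float truncation; PySem.Int.truncdiv is exact for |aux| < 2^53, which Dom guarantees
def check_if_palindrome_loop (aux inv : Int) : Int :=
  if h : aux = 0 then inv
  else check_if_palindrome_loop (PySem.Int.truncdiv aux 10) (inv * 10 + PySem.Int.mod aux 10)
termination_by aux.natAbs
decreasing_by exact pv_tdiv_ten_natAbs_lt _ h

def check_if_palindrome (n : Int) : Bool :=
  if n = check_if_palindrome_loop n 0 then true else false

-- state (largest, temp_largest, location); list[i] is always in range here, the default 0 is never used
def get_longest_all_palindromes (list : List Int) : List Int :=
  let s := (PySem.List.enumerate list 0).foldl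
    (fun (st : Int × Int × Int) cv =>
      let temp' := if check_if_palindrome cv.2 = true then st.2.1 + 1 else 0
      if temp' ≥ st.1 then (temp', temp', cv.1 + 1 - temp') else (st.1, temp', st.2.2))
    (0, 0, 0)
  (PySem.List.pyRange s.2.2 (s.2.2 + s.1) 1).foldl
    (fun acc i => acc ++ [PySem.List.pyGetD list i 0]) []

-- ===== PORT B =====
-- state (best, cur): cur is the current run of palindromes, best the last longest run so far
def get_longest_all_palindromes_alt (list : List Int) : List Int :=
  (list.foldl
    (fun (st : List Int × List Int) v =>
      let cur' := if check_if_palindrome v then st.2 ++ [v] else []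
      if cur'.length ≥ st.1.length then (cur', cur') else (st.1, cur'))
    ([], [])).1

-- ===== PRECONDITION & SPEC =====
def Spec_get_longest_all_palindromes (list : List Int) (out : List Int) : Prop := out = get_longest_all_palindromes_alt list
instance (list : List Int) (out : List Int) : Decidable (Spec_get_longest_all_palindromes list out) := by unfold Spec_get_longest_all_palindromes; infer_instance

-- ===== CLAIM (what is proved, stated in full; the proofs are below) =====
def Claim_equal_get_longest_all_palindromes : Prop := ∀ (list : List Int), Dom_get_longest_all_palindromes list → Spec_get_longest_all_palindromes list (get_longest_all_palindromes list)

-- ===== LEMMAS AND PROOFS =====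

-- Invariant of the two folds: with pref already processed, A's state is
-- (best.length, cur.length, location) where best is the slice [location, location + best.length)
-- of pref and cur is the suffix of pref of length cur.length.
lemma pv_loop_inv (rest : List Int) : ∀ (pref best cur : List Int) (location : Int),
    cur = pref.drop (pref.length - cur.length) →
    0 ≤ location →
    location.toNat + best.length ≤ pref.length →
    best = (pref.drop location.toNat).take best.length →
    (let sA := (PySem.List.enumerate rest (pref.length : Int)).foldl
        (fun (st : Int × Int × Int) cv =>
          let temp' := if check_if_palindrome cv.2 = true then st.2.1 + 1 else 0
          if temp' ≥ st.1 then (temp', temp', cv.1 + 1 - temp') else (st.1, temp', st.2.2))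
        ((best.length : Int), (cur.length : Int), location)
     let sB := rest.foldl
        (fun (st : List Int × List Int) v =>
          let cur' := if check_if_palindrome v then st.2 ++ [v] else []
          if cur'.length ≥ st.1.length then (cur', cur') else (st.1, cur'))
        (best, cur)
     sA.1 = (sB.1.length : Int) ∧ 0 ≤ sA.2.2 ∧
       sA.2.2.toNat + sB.1.length ≤ (pref ++ rest).length ∧
       sB.1 = (((pref ++ rest).drop sA.2.2.toNat).take sB.1.length)) := by
  induction rest with
  | nil =>
    intro pref best cur location hcur hloc hbnd hbest
    simp only [PySem.List.enumerate_nil, List.foldl_nil, List.append_nil]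
    exact ⟨trivial, hloc, hbnd, hbest⟩
  | cons v rest ih =>
    intro pref best cur location hcur hloc hbnd hbest
    have hclen : cur.length ≤ pref.length := by
      have := congrArg List.length hcur
      simp [List.length_drop] at this
      omega
    rw [PySem.List.enumerate_cons]
    simp only [List.foldl_cons]
    by_cases hc : check_if_palindrome v = true
    · -- cur' = cur ++ [v]
      have hcur' : cur ++ [v] = (pref ++ [v]).drop ((pref ++ [v]).length - (cur ++ [v]).length) := by
        have hm : (pref ++ [v]).length - (cur ++ [v]).length = pref.length - cur.length := by
          simp
        rw [hm, List.drop_append_of_le_length (by omega), ← hcur]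
      by_cases hge : ((best.length : Int) ≤ (cur.length : Int) + 1)
      · -- run extended and it still wins
        have hgeN : best.length ≤ cur.length + 1 := by exact_mod_cast hge
        have hl0 : (0 : Int) ≤ (pref.length : Int) + 1 - ((cur.length : Int) + 1) := by omega
        have hbnd' : ((pref.length : Int) + 1 - ((cur.length : Int) + 1)).toNat + (cur ++ [v]).length
            ≤ (pref ++ [v]).length := by simp; omega
        have hbest' : cur ++ [v] = ((pref ++ [v]).drop
            (((pref.length : Int) + 1 - ((cur.length : Int) + 1)).toNat)).take (cur ++ [v]).length := by
          have hto : ((pref.length : Int) + 1 - ((cur.length : Int) + 1)).toNat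
              = (pref ++ [v]).length - (cur ++ [v]).length := by simp
          rw [hto, ← hcur', List.take_length]
        have hres := ih (pref ++ [v]) (cur ++ [v]) (cur ++ [v])
            ((pref.length : Int) + 1 - ((cur.length : Int) + 1)) hcur' hl0 hbnd' hbest'
        simpa [hc, hge, hgeN] using hres
      · -- run extended but the old best is still strictly longer
        have hltN : ¬ best.length ≤ cur.length + 1 := by exact_mod_cast hge
        have hbest' : best = ((pref ++ [v]).drop location.toNat).take best.length := by
          rw [List.drop_append_of_le_length (by omega),
              List.take_append_of_le_length (by simp [List.length_drop]; omega)]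
          exact hbest
        have hres := ih (pref ++ [v]) best (cur ++ [v]) location hcur' hloc
            (by simp; omega) hbest'
        simpa [hc, hge, hltN] using hres
    · -- non-palindrome: cur' = []
      have hcur0 : ([] : List Int) = (pref ++ [v]).drop ((pref ++ [v]).length - ([] : List Int).length) := by
        simp
      by_cases hb0 : best.length = 0
      · -- the empty run ties the (empty) best: A moves location to count+1, B keeps best = []
        have hres := ih (pref ++ [v]) ([] : List Int) ([] : List Int)
            ((pref.length : Int) + 1) hcur0 (by positivity)
            (by simp) (by simp)
        have hbe : best = [] := List.length_eq_zero_iff.mp hb0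
        simpa [hc, hb0, hbe] using hres
      · -- best stays, run resets
        have hbest' : best = ((pref ++ [v]).drop location.toNat).take best.length := by
          rw [List.drop_append_of_le_length (by omega),
              List.take_append_of_le_length (by simp [List.length_drop]; omega)]
          exact hbest
        have hres := ih (pref ++ [v]) best ([] : List Int) location hcur0 hloc
            (by simp; omega) hbest'
        simpa [hc, hb0] using hres

-- A's reconstruction loop reads exactly the slice [a, a + n) of xs
lemma pv_reconstruct_nat (xs : List Int) (a n : Nat) (h : a + n ≤ xs.length) :
    (PySem.List.pyRange (a : Int) ((a : Int) + (n : Int)) 1).foldl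
      (fun acc i => acc ++ [PySem.List.pyGetD xs i 0]) [] = (xs.drop a).take n := by
  induction n with
  | zero => simp [PySem.List.pyRange_one_eq_nil]
  | succ n ih =>
    have h' : a + n ≤ xs.length := by omega
    have hcast : (a : Int) + ((n + 1 : Nat) : Int) = ((a : Int) + (n : Int)) + 1 := by push_cast; ring
    rw [hcast, PySem.List.pyRange_one_succ_right (by omega), List.foldl_append, ih h']
    have hidx : (a : Int) + (n : Int) = ((a + n : Nat) : Int) := by push_cast; ring
    have hget : PySem.List.pyGetD xs ((a : Int) + (n : Int)) 0 = xs[a + n]'(by omega) := by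
      rw [hidx, PySem.List.pyGetD_natCast]
      exact List.getD_eq_getElem xs 0 (by omega)
    have hgd : (xs.drop a)[n]? = some (xs[a + n]'(by omega)) := by
      rw [List.getElem?_drop]
      exact List.getElem?_eq_getElem (by omega)
    simp only [List.foldl_cons, List.foldl_nil, hget]
    rw [List.take_add_one, hgd]
    simp

-- ===== VERDICT (by name: the statement is the Claim_ definition above) =====
theorem get_longest_all_palindromes_spec : Claim_equal_get_longest_all_palindromes := by
  unfold Claim_equal_get_longest_all_palindromes
  intro list _
  unfold Spec_get_longest_all_palindromes
  unfold get_longest_all_palindromes get_longest_all_palindromes_alt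
  have hinv := pv_loop_inv list [] [] [] 0 (by simp) (by norm_num) (by simp) (by simp)
  simp only [List.length_nil, Nat.cast_zero, List.nil_append] at hinv
  dsimp only at hinv ⊢
  obtain ⟨h1, h2, h3, h4⟩ := hinv
  rw [h1, (Int.toNat_of_nonneg h2).symm]
  rw [pv_reconstruct_nat list _ _ h3]
  exact h4.symm
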